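-- pv_equiv track=rewrite | github.com/nd-cse-30872-fa21/cse-30872-fa21-examples | lecture02/exercise02-A/solution.py | count_table
-- ===== SOURCE A (Python) =====
-- def count_table(numbers):
--     total = 0
--     seen  = set()
--     for number in numbers:
--         if number in seen:
--             total += 1
--         else:
--             seen.add(number)
--     return total
-- ===== SOURCE B (Python) =====
-- def count_table(numbers):
--     numbers = list(numbers)
--     return len(numbers) - len(set(numbers))
-- ===== Notes on version B (the rewrite author's own statement) =====
-- stated objective: simpler
-- what changed: Replaces the per-element scan with membership tests and an accumulator by the closed form len(numbers) - len(set(numbers)).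
import Mathlib
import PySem

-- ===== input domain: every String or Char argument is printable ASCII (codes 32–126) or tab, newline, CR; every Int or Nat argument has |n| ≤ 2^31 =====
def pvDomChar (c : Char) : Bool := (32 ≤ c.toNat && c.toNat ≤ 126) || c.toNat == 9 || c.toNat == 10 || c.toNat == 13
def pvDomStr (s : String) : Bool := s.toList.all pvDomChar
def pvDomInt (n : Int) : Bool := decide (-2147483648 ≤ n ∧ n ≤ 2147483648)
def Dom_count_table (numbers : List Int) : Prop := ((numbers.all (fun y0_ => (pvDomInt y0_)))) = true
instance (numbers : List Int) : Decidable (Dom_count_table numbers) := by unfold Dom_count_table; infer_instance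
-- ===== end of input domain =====

-- ===== PORT A =====
-- total = 0; seen = set(); for number: if number in seen: total += 1 else seen.add(number)
def count_table (numbers : List Int) : Int :=
  (numbers.foldl
    (fun (st : Int × PySem.Set Int) number =>
      if number ∈ st.2 then (st.1 + 1, st.2) else (st.1, PySem.Set.add st.2 number))
    (0, PySem.Set.empty)).1

-- ===== PORT B =====
-- B: len(numbers) - len(set(numbers))
def count_table_alt (numbers : List Int) : Int :=
  (numbers.length : Int) - ((PySem.Set.ofList numbers).length : Int)

-- ===== PRECONDITION & SPEC =====
def Spec_count_table (numbers : List Int) (out : Int) : Prop := out = count_table_alt numbers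
instance (numbers : List Int) (out : Int) : Decidable (Spec_count_table numbers out) := by unfold Spec_count_table; infer_instance

-- ===== CLAIM (what is proved, stated in full; the proofs are below) =====
def Claim_equal_count_table : Prop := ∀ (numbers : List Int), Dom_count_table numbers → Spec_count_table numbers (count_table numbers)

-- ===== LEMMAS AND PROOFS =====

lemma ct_invariant (xs : List Int) : ∀ (t : Int) (s : PySem.Set Int),
    (xs.foldl (fun (st : Int × PySem.Set Int) number =>
      if number ∈ st.2 then (st.1 + 1, st.2) else (st.1, PySem.Set.add st.2 number)) (t, s)).1
      + ((PySem.Set.update s xs).length : Int)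
    = t + (s.length : Int) + (xs.length : Int) := by
  induction xs with
  | nil => intro t s; simp [PySem.Set.update]
  | cons n xs ih =>
    intro t s
    by_cases h : n ∈ s
    · simp only [List.foldl_cons, PySem.Set.update, if_pos h, PySem.Set.add_of_mem h]
      have := ih (t + 1) s
      simp only [PySem.Set.update] at this
      simp [this]; ring
    · simp only [List.foldl_cons, PySem.Set.update, if_neg h, PySem.Set.add_of_not_mem h]
      have := ih t (s ++ [n])
      simp only [PySem.Set.update] at this
      simp [this]; ring

-- ===== VERDICT (by name: the statement is the Claim_ definition above) =====
theorem count_table_spec : Claim_equal_count_table := by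
  intro numbers _
  unfold Spec_count_table count_table count_table_alt
  have h := ct_invariant numbers 0 PySem.Set.empty
  have hof : PySem.Set.update PySem.Set.empty numbers = PySem.Set.ofList numbers := rfl
  rw [hof] at h
  have he : ((PySem.Set.empty : PySem.Set Int).length : Int) = 0 := rfl
  rw [he] at h
  omega
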